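-- pv_equiv track=rewrite | github.com/foxrylai/L-Oreal | vSmart/Ver 1.2/Policy_Matrix_Creation_Ver_1.2.py | capture_content_list
-- ===== SOURCE A (Python) =====
-- def capture_content_list(keyword, list):
--     content_list = []
--     for line_1 in list:
--         if keyword in line_1:
--             start_line = list.index(line_1)
--             end_line = None
--             for line_2 in list[start_line+1:]:
--                 if keyword in line_2:
--                     end_line = list.index(line_2)
--                     break
--             if end_line == None:
--                 end_line = len(list)
--             temp_list = []
--             for line_3 in list[start_line:end_line]:
--                 temp_list.append(line_3)
--             content_list.append(temp_list)
--     return content_list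
-- ===== SOURCE B (Python) =====
-- def capture_content_list(keyword, list):
--     # Segments run from each keyword-containing line to the next one (or the end).
--     hits = [i for i, line in enumerate(list) if keyword in line]
--     bounds = hits + [len(list)]
--     return [list[bounds[k]:bounds[k + 1]] for k in range(len(hits))]
-- ===== Notes on version B (the rewrite author's own statement) =====
-- stated objective: simpler
-- what changed: A rescans the list for every keyword-containing line (list.index calls plus an inner scan for the next keyword line); B collects the keyword positions in one pass and slices the list between consecutive positions.
-- intended difference: On lists where some keyword-containing line also occurs at an earlier index, A resolves segment boundaries with list.index and so returns segments cut at the first occurrence of the line's text (often empty or wrongly placed segments); B returns the segment starting at the line's actual position, which is the intended extraction. — e.g. on capture_content_list("k", ["k", "k"]): A returns [[], []], B returns [["k"], ["k"]]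
import Mathlib
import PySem

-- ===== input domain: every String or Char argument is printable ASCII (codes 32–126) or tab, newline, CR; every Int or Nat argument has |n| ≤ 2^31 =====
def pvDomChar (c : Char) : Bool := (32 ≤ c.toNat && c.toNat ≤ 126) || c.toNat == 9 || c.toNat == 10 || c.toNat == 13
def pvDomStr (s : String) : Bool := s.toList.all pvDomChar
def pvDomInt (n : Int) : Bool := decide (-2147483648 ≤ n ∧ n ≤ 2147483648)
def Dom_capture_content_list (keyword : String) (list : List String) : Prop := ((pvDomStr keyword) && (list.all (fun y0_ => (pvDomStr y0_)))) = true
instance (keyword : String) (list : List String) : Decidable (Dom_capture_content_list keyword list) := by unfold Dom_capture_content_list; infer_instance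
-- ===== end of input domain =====

-- B collects the keyword positions in one pass and slices between consecutive positions,
-- instead of A's per-line rescans (list.index plus an inner scan); on lists where a
-- keyword-containing line repeats an earlier line, A's list.index-based boundaries are
-- wrong and B intentionally differs (see D_ below).

-- ===== PORT A =====
-- A's loop body for one keyword-containing line_1 (the then-branch, kept as a helper).
-- list.index(line_1)/list.index(line_2) cannot raise (the value is in the list), so .getD 0 is unreachable.
def pvBodyA (keyword : String) (list : List String) (line_1 : String) : List String :=
  let start_line : Int := ((PySem.List.index? list line_1).getD 0 : Nat)
  -- inner 'for line_2 … if …: end_line = list.index(line_2); break' = first match of the scan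
  let end_line : Int :=
    match (PySem.List.slice list (some (start_line + 1)) none).find?
        (fun line_2 => PySem.Str.isIn keyword line_2) with
    | some line_2 => ((PySem.List.index? list line_2).getD 0 : Nat)
    | none => (list.length : Int)
  -- 'temp_list = []; for line_3 in list[start_line:end_line]: temp_list.append(line_3)'
  (PySem.List.slice list (some start_line) (some end_line)).foldl
    (fun temp_list line_3 => temp_list ++ [line_3]) []

def capture_content_list (keyword : String) (list : List String) : List (List String) :=
  list.foldl
    (fun content_list line_1 =>
      if PySem.Str.isIn keyword line_1 then content_list ++ [pvBodyA keyword list line_1]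
      else content_list)
    []

-- ===== PORT B =====
-- bounds[k] / bounds[k+1] are valid indices (k < len(hits), |bounds| = |hits|+1), so .getD 0 is unreachable.
def capture_content_list_alt (keyword : String) (list : List String) : List (List String) :=
  let hits : List Int :=
    ((PySem.List.enumerate list).filter (fun il => PySem.Str.isIn keyword il.2)).map
      (fun il => il.1)
  let bounds : List Int := hits ++ [(list.length : Int)]
  (List.range hits.length).map (fun (k : Nat) =>
    PySem.List.slice list (some ((PySem.List.pyGet? bounds (k : Int)).getD 0))
      (some ((PySem.List.pyGet? bounds ((k : Int) + 1)).getD 0)))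

-- ===== PRECONDITION & SPEC =====
-- On lists where some keyword-containing line also occurs at an earlier index, A resolves
-- segment boundaries with list.index and so cuts segments at the FIRST occurrence of the
-- line's text (often empty or wrongly placed segments); B returns the segment starting at
-- the line's actual position, which is the intended extraction.
def D_capture_content_list (keyword : String) (list : List String) : Prop :=
  ((List.range list.length).any (fun j =>
    PySem.Str.isIn keyword (list.getD j "") &&
      (PySem.List.index? list (list.getD j "") != some j))) = true
instance (keyword : String) (list : List String) : Decidable (D_capture_content_list keyword list) := by unfold D_capture_content_list; infer_instance

def Spec_capture_content_list (keyword : String) (list : List String) (out : List (List String)) : Prop := ¬ D_capture_content_list keyword list → out = capture_content_list_alt keyword list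
instance (keyword : String) (list : List String) (out : List (List String)) : Decidable (Spec_capture_content_list keyword list out) := by unfold Spec_capture_content_list; infer_instance

def pvDiffWitness_capture_content_list : String × List String := ("k", ["k", "k"])
def pvDiffWitnessOut_capture_content_list : (List (List String)) × (List (List String)) :=
  ([[], []], [["k"], ["k"]])

-- ===== CLAIM (what is proved, stated in full; the proofs are below) =====
def Claim_unchanged_capture_content_list : Prop := ∀ (keyword : String) (list : List String), Dom_capture_content_list keyword list → Spec_capture_content_list keyword list (capture_content_list keyword list)
def Claim_changed_capture_content_list : Prop := Dom_capture_content_list (pvDiffWitness_capture_content_list.1) (pvDiffWitness_capture_content_list.2) ∧ D_capture_content_list (pvDiffWitness_capture_content_list.1) (pvDiffWitness_capture_content_list.2) ∧ capture_content_list (pvDiffWitness_capture_content_list.1) (pvDiffWitness_capture_content_list.2) = pvDiffWitnessOut_capture_content_list.1 ∧ capture_content_list_alt (pvDiffWitness_capture_content_list.1) (pvDiffWitness_capture_content_list.2) = pvDiffWitnessOut_capture_content_list.2 ∧ pvDiffWitnessOut_capture_content_list.1 ≠ pvDiffWitnessOut_capture_content_list.2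

-- ===== LEMMAS AND PROOFS =====

-- keyword-hit positions of list, as Nat indices (proof-side view shared by both ports)
def pvHits (keyword : String) (list : List String) : List Nat :=
  (List.range list.length).filter (fun k => PySem.Str.isIn keyword (list.getD k ""))

-- least index ≥ t that is a keyword hit (proof-side view of A's inner scan)
def pvNhf (keyword : String) (list : List String) (t : Nat) : Option Nat :=
  if h : t < list.length then
    (if PySem.Str.isIn keyword (list.getD t "") then some t
     else pvNhf keyword list (t + 1))
  else none
termination_by list.length - t

theorem pv_mem_hits {keyword : String} {list : List String} {k : Nat} :
    k ∈ pvHits keyword list ↔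
      k < list.length ∧ PySem.Str.isIn keyword (list.getD k "") = true := by
  simp [pvHits, List.mem_filter, List.mem_range]

theorem pv_hits_sorted (keyword : String) (list : List String) :
    (pvHits keyword list).Pairwise (· < ·) := by
  exact (List.pairwise_lt_range).sublist (List.filter_sublist)

theorem pv_range_map_getD (list : List String) :
    (List.range list.length).map (fun k => list.getD k "") = list := by
  induction list with
  | nil => simp
  | cons x xs ih =>
    simp [List.range_succ_eq_map, List.map_map]
    exact ih

theorem pv_enumerate_eq (list : List String) :
    PySem.List.enumerate list =
      (List.range list.length).map (fun (k : Nat) => ((k : Int), list.getD k "")) := by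
  rw [PySem.List.enumerate_eq_map_pyRange list ""]
  rw [show PySem.List.len list = (list.length : Int) from rfl]
  rw [PySem.List.pyRange_zero_natCast, List.map_map]
  exact List.map_congr_left (fun k _ => by simp [PySem.List.pyGetD_natCast])

theorem pv_filter_eq (keyword : String) (list : List String) :
    list.filter (fun line => PySem.Str.isIn keyword line) =
      (pvHits keyword list).map (fun k => list.getD k "") := by
  conv_lhs => rw [← pv_range_map_getD list]
  rw [List.filter_map]
  rfl

theorem pv_hits_cast (keyword : String) (list : List String) :
    ((PySem.List.enumerate list).filter (fun il => PySem.Str.isIn keyword il.2)).map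
        (fun il => il.1) =
      List.map (fun (k : Nat) => (k : Int)) (pvHits keyword list) := by
  rw [pv_enumerate_eq, List.filter_map, List.map_map]
  rfl

theorem pv_A_eq_map (keyword : String) (list : List String) :
    capture_content_list keyword list =
      (pvHits keyword list).map (fun k => pvBodyA keyword list (list.getD k "")) := by
  unfold capture_content_list
  rw [PySem.List.foldl_append_if (fun line_1 => PySem.Str.isIn keyword line_1)
      (pvBodyA keyword list) list []]
  rw [pv_filter_eq, List.map_map]
  rfl

-- A's inner scan over list[t:]: first keyword line = pvNhf
theorem pv_find_drop (keyword : String) (list : List String) (t : Nat) :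
    ((list.drop t).find? (fun line_2 => PySem.Str.isIn keyword line_2)) =
      (pvNhf keyword list t).map (fun m => list.getD m "") := by
  rw [pvNhf]
  by_cases h : t < list.length
  · rw [dif_pos h, List.drop_eq_getElem_cons h, List.find?_cons]
    rw [PySem.List.getD_eq_getElem_of_lt list t "" h]
    by_cases hp : PySem.Str.isIn keyword list[t] = true
    · have hp' : PySem.Chars.isIn keyword.toList list[t].toList = true := by
        simpa [PySem.Str.isIn] using hp
      simp [hp', List.getD_eq_getElem?_getD, List.getElem?_eq_getElem h]
    · rw [Bool.not_eq_true] at hp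
      have hp' : PySem.Chars.isIn keyword.toList list[t].toList = false := by
        simpa [PySem.Str.isIn] using hp
      simp only [hp, Bool.false_eq_true, if_false]
      exact pv_find_drop keyword list (t + 1)
  · rw [dif_neg h, List.drop_eq_nil_of_le (le_of_not_gt h)]
    simp
termination_by list.length - t

theorem pv_nhf_some (keyword : String) (list : List String) (t m : Nat)
    (h : pvNhf keyword list t = some m) :
    m ∈ pvHits keyword list ∧ t ≤ m ∧
      (∀ k ∈ pvHits keyword list, t ≤ k → m ≤ k) := by
  rw [pvNhf] at h
  by_cases hlt : t < list.length
  · rw [dif_pos hlt] at h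
    by_cases hp : PySem.Str.isIn keyword (list.getD t "") = true
    · rw [if_pos hp] at h
      obtain rfl : t = m := by simpa using h
      exact ⟨pv_mem_hits.mpr ⟨hlt, hp⟩, le_refl _, fun k _ hk => hk⟩
    · rw [if_neg hp] at h
      obtain ⟨h1, h2, h3⟩ := pv_nhf_some keyword list (t + 1) m h
      refine ⟨h1, by omega, fun k hk htk => ?_⟩
      rcases Nat.eq_or_lt_of_le htk with heq | hlt'
      · exact absurd (pv_mem_hits.mp hk).2 (heq ▸ hp)
      · exact h3 k hk hlt'
  · rw [dif_neg hlt] at h; exact absurd h (by simp)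
termination_by list.length - t

theorem pv_nhf_none (keyword : String) (list : List String) (t : Nat)
    (h : pvNhf keyword list t = none) :
    ∀ k ∈ pvHits keyword list, k < t := by
  rw [pvNhf] at h
  by_cases hlt : t < list.length
  · rw [dif_pos hlt] at h
    by_cases hp : PySem.Str.isIn keyword (list.getD t "") = true
    · rw [if_pos hp] at h; exact absurd h (by simp)
    · rw [if_neg hp] at h
      intro k hk
      have := pv_nhf_none keyword list (t + 1) h k hk
      rcases Nat.lt_or_ge k t with h' | h'
      · exact h'
      · rcases Nat.eq_or_lt_of_le h' with heq | hlt'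
        · exact absurd (pv_mem_hits.mp hk).2 (heq ▸ hp)
        · omega
  · rw [dif_neg hlt] at h
    intro k hk
    have := (pv_mem_hits.mp hk).1
    omega
termination_by list.length - t

-- pvNhf after a hit is the next hit in pvHits (or none at the last hit)
theorem pv_nhf_at (keyword : String) (list : List String) (k' : Nat)
    (hk' : k' < (pvHits keyword list).length) :
    pvNhf keyword list ((pvHits keyword list)[k'] + 1) =
      (if h : k' + 1 < (pvHits keyword list).length then
        some ((pvHits keyword list)[k' + 1]'h) else none) := by
  have hmono := List.pairwise_iff_getElem.mp (pv_hits_sorted keyword list)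
  by_cases h2 : k' + 1 < (pvHits keyword list).length
  · rw [dif_pos h2]
    cases hres : pvNhf keyword list ((pvHits keyword list)[k'] + 1) with
    | none =>
      exfalso
      have ha := pv_nhf_none keyword list _ hres (pvHits keyword list)[k' + 1]
        (List.getElem_mem h2)
      have hb := hmono k' (k' + 1) hk' h2 (by omega)
      omega
    | some m =>
      obtain ⟨hm, hle, hmin⟩ := pv_nhf_some keyword list _ _ hres
      congr 1
      have h1 : m ≤ (pvHits keyword list)[k' + 1] := hmin _ (List.getElem_mem h2)
        (by have := hmono k' (k' + 1) hk' h2 (by omega); omega)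
      have h2' : (pvHits keyword list)[k' + 1] ≤ m := by
        obtain ⟨j, hj, hjm⟩ := List.mem_iff_getElem.mp hm
        rcases Nat.lt_or_ge j (k' + 1) with hj' | hj'
        · exfalso
          rcases Nat.eq_or_lt_of_le (Nat.le_of_lt_succ hj') with heq | hlt'
          · subst heq; omega
          · have := hmono j k' hj hk' hlt'; omega
        · rcases Nat.eq_or_lt_of_le hj' with heq | hlt'
          · subst heq; omega
          · have := hmono (k' + 1) j h2 hj hlt'; omega
      omega
  · rw [dif_neg h2]
    cases hres : pvNhf keyword list ((pvHits keyword list)[k'] + 1) with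
    | none => rfl
    | some m =>
      exfalso
      obtain ⟨hm, hle, _⟩ := pv_nhf_some keyword list _ _ hres
      obtain ⟨j, hj, hjm⟩ := List.mem_iff_getElem.mp hm
      have hjk : j ≤ k' := by omega
      rcases Nat.eq_or_lt_of_le hjk with heq | hlt'
      · subst heq; omega
      · have := hmono j k' hj hk' hlt'; omega

-- outside D_, list.index of any keyword-hit line is its own position
theorem pv_index_of_hit {keyword : String} {list : List String}
    (hD : ¬ D_capture_content_list keyword list) {k : Nat}
    (hk : k ∈ pvHits keyword list) :
    PySem.List.index? list (list.getD k "") = some k := by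
  obtain ⟨hkn, hkp⟩ := pv_mem_hits.mp hk
  by_contra hne
  apply hD
  unfold D_capture_content_list
  rw [List.any_eq_true]
  refine ⟨k, List.mem_range.mpr hkn, ?_⟩
  rw [Bool.and_eq_true, hkp]
  exact ⟨rfl, bne_iff_ne.mpr hne⟩

-- A's body at the k'-th hit, outside D_: the slice between consecutive hit positions
theorem pv_bodyA_eq (keyword : String) (list : List String)
    (hD : ¬ D_capture_content_list keyword list) (k' : Nat)
    (hk' : k' < (pvHits keyword list).length) :
    pvBodyA keyword list (list.getD ((pvHits keyword list)[k']) "") =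
      PySem.List.slice list (some ((pvHits keyword list)[k'] : Int))
        (some (if h : k' + 1 < (pvHits keyword list).length then
          (((pvHits keyword list)[k' + 1]'h : Nat) : Int) else (list.length : Int))) := by
  have hkH : (pvHits keyword list)[k'] ∈ pvHits keyword list := List.getElem_mem hk'
  have hidx := pv_index_of_hit hD hkH
  have hscan : ((PySem.List.slice list (some (((pvHits keyword list)[k'] : Int) + 1)) none).find?
        (fun line_2 => PySem.Str.isIn keyword line_2)) =
      (if h : k' + 1 < (pvHits keyword list).length then
        some (list.getD ((pvHits keyword list)[k' + 1]'h) "") else none) := by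
    have hcast : (((pvHits keyword list)[k'] : Int) + 1) =
        ((((pvHits keyword list)[k'] + 1 : Nat) : Nat) : Int) := by push_cast; ring
    rw [hcast, PySem.List.slice_from_natCast, pv_find_drop, pv_nhf_at keyword list k' hk']
    by_cases h2 : k' + 1 < (pvHits keyword list).length
    · rw [dif_pos h2, dif_pos h2]; rfl
    · rw [dif_neg h2, dif_neg h2]; rfl
  simp only [pvBodyA]
  rw [hidx, Option.getD_some, hscan]
  by_cases h2 : k' + 1 < (pvHits keyword list).length
  · rw [dif_pos h2, dif_pos h2]
    have hidx2 := pv_index_of_hit hD (List.getElem_mem h2)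
    simp only [hidx2, Option.getD_some]
    rw [PySem.List.foldl_append_singleton_eq_self, List.nil_append]
  · rw [dif_neg h2, dif_neg h2]
    rw [PySem.List.foldl_append_singleton_eq_self, List.nil_append]

-- B as a map over hit indices, with the pyGet? defaults resolved
theorem pv_B_eq (keyword : String) (list : List String) :
    capture_content_list_alt keyword list =
      (List.range (pvHits keyword list).length).map (fun (k' : Nat) =>
        PySem.List.slice list
          (some ((PySem.List.pyGet?
            ((List.map (fun (j : Nat) => (j : Int)) (pvHits keyword list)) ++
              [(list.length : Int)]) (k' : Int)).getD 0))
          (some ((PySem.List.pyGet?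
            ((List.map (fun (j : Nat) => (j : Int)) (pvHits keyword list)) ++
              [(list.length : Int)]) ((k' : Int) + 1)).getD 0))) := by
  simp only [capture_content_list_alt]
  rw [pv_hits_cast, List.length_map]

-- the k'-th entry of bounds = hits ++ [len]
theorem pv_bounds_get (keyword : String) (list : List String) (k' : Nat)
    (hk' : k' ≤ (pvHits keyword list).length) :
    (PySem.List.pyGet?
        ((List.map (fun (j : Nat) => (j : Int)) (pvHits keyword list)) ++
          [(list.length : Int)]) (k' : Int)) =
      some (if h : k' < (pvHits keyword list).length then
        (((pvHits keyword list)[k'] : Nat) : Int) else (list.length : Int)) := by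
  rw [PySem.List.pyGet?_natCast]
  by_cases h : k' < (pvHits keyword list).length
  · rw [dif_pos h, List.getElem?_append_left (by simpa using h)]
    simp
  · rw [dif_neg h]
    have hk : k' = (pvHits keyword list).length := by omega
    subst hk
    rw [List.getElem?_append_right (by simp)]
    simp

theorem capture_content_list_unchanged_aux (keyword : String) (list : List String)
    (hD : ¬ D_capture_content_list keyword list) :
    capture_content_list keyword list = capture_content_list_alt keyword list := by
  rw [pv_A_eq_map, pv_B_eq]
  apply List.ext_getElem
  · simp
  · intro i h1 h2
    have hi : i < (pvHits keyword list).length := by simpa using h1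
    rw [List.getElem_map, List.getElem_map, List.getElem_range]
    rw [pv_bodyA_eq keyword list hD i hi]
    have hcast : ((i : Int) + 1) = (((i + 1 : Nat) : Nat) : Int) := by push_cast; ring
    rw [hcast, pv_bounds_get keyword list i (le_of_lt hi),
      pv_bounds_get keyword list (i + 1) (by omega), Option.getD_some, Option.getD_some,
      dif_pos hi]

-- ===== VERDICT (by name: the statement is the Claim_ definition above) =====
theorem capture_content_list_spec : Claim_unchanged_capture_content_list := by
  intro keyword list _
  unfold Spec_capture_content_list
  intro hD
  exact capture_content_list_unchanged_aux keyword list hD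

theorem capture_content_list_changed : Claim_changed_capture_content_list := by
  unfold Claim_changed_capture_content_list
  decide
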